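-- pv_equiv track=rewrite | github.com/Tony-Chen-Fluor/lllm | full-stack-deepagents/ai-api/main.py | _merge_skill_hints
-- ===== SOURCE A (Python) =====
-- def _merge_skill_hints(
--     tools_used: list[str],
--     from_read_file: list[str],
-- ) -> list[str]:
--     seen: set[str] = set()
--     out: list[str] = []
--     for s in from_read_file:
--         if s not in seen:
--             seen.add(s)
--             out.append(s)
--     if "action_finder_log" in tools_used and "action-finder" not in seen:
--         out.append("action-finder")
--     return out
-- ===== SOURCE B (Python) =====
-- def _merge_skill_hints(
--     tools_used: list[str],
--     from_read_file: list[str],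
-- ) -> list[str]:
--     rest = list(from_read_file)
--     if "action_finder_log" in tools_used:
--         rest.append("action-finder")
--     out: list[str] = []
--     while rest:
--         head = rest[0]
--         out.append(head)
--         rest = [x for x in rest[1:] if x != head]
--     return out
-- ===== Notes on version B (the rewrite author's own statement) =====
-- stated objective: alternative
-- what changed: Instead of tracking a 'seen' set while appending, B conditionally appends 'action-finder' and then deduplicates by repeatedly taking the head and filtering all of its later copies out of the remaining list (a filter-based nub), so no seen-set or membership state is maintained at all.
import Mathlib
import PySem

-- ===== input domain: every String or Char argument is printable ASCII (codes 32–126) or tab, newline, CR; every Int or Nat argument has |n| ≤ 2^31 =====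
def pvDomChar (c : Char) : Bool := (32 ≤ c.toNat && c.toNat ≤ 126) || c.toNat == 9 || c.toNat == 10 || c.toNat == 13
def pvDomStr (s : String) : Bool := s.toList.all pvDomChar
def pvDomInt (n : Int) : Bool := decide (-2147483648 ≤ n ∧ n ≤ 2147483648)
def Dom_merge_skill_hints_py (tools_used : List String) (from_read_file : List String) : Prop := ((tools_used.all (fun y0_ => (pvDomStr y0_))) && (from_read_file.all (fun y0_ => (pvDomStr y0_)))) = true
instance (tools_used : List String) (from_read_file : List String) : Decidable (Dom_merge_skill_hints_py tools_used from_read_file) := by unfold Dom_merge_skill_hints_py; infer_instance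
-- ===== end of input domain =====

-- B replaces A's seen-set bookkeeping by a conditional append followed by a filter-based
-- nub (take the head, filter its later copies out of the rest); objective: alternative.

-- ===== PORT A =====
-- loop: seen-set + out list built together, then the guarded append
def merge_skill_hints_py (tools_used : List String) (from_read_file : List String) : List String :=
  let st := from_read_file.foldl
    (fun (p : PySem.Set String × List String) s =>
      if PySem.Set.contains p.1 s then p else (PySem.Set.add p.1 s, p.2 ++ [s]))
    (PySem.Set.empty, [])
  if "action_finder_log" ∈ tools_used ∧ ¬ PySem.Set.contains st.1 "action-finder" then
    st.2 ++ ["action-finder"]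
  else
    st.2

-- ===== PORT B =====
-- Source B's while loop: take rest[0], filter its copies out of rest[1:], repeat
def pvNubFilter : List String → List String
  | [] => []
  | h :: t => h :: pvNubFilter (t.filter (fun x => x != h))
termination_by l => l.length
decreasing_by
  simp only [List.length_cons, List.length_unattach]
  exact Nat.lt_succ_of_le (le_trans (List.length_filter_le _ _) (by simp))

def merge_skill_hints_py_alt (tools_used : List String) (from_read_file : List String) : List String :=
  let rest :=
    if "action_finder_log" ∈ tools_used then from_read_file ++ ["action-finder"]
    else from_read_file
  pvNubFilter rest

-- ===== PRECONDITION & SPEC =====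
def Spec_merge_skill_hints_py (tools_used : List String) (from_read_file : List String) (out : List String) : Prop := out = merge_skill_hints_py_alt tools_used from_read_file
instance (tools_used : List String) (from_read_file : List String) (out : List String) : Decidable (Spec_merge_skill_hints_py tools_used from_read_file out) := by unfold Spec_merge_skill_hints_py; infer_instance

-- ===== CLAIM (what is proved, stated in full; the proofs are below) =====
def Claim_equal_merge_skill_hints_py : Prop := ∀ (tools_used : List String) (from_read_file : List String), Dom_merge_skill_hints_py tools_used from_read_file → Spec_merge_skill_hints_py tools_used from_read_file (merge_skill_hints_py tools_used from_read_file)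

-- ===== LEMMAS AND PROOFS =====

-- A's loop, started in a state whose two components are the same list, keeps them
-- equal and computes Set.update of that list.
theorem mergeA_loop (frf : List String) (s : PySem.Set String) :
    frf.foldl
      (fun (p : PySem.Set String × List String) x =>
        if PySem.Set.contains p.1 x then p else (PySem.Set.add p.1 x, p.2 ++ [x]))
      (s, (s : List String))
      = (PySem.Set.update s frf, (PySem.Set.update s frf : List String)) := by
  induction frf generalizing s with
  | nil => simp [PySem.Set.update]
  | cons x xs ih =>
    have hupd : PySem.Set.update s (x :: xs) = PySem.Set.update (PySem.Set.add s x) xs := by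
      simp [PySem.Set.update]
    simp only [List.foldl_cons]
    by_cases h : PySem.Set.contains s x = true
    · have hadd : PySem.Set.add s x = s := by
        simp [PySem.Set.add, (PySem.Set.contains_iff s x).mp h]
      rw [if_pos h, ih, hupd, hadd]
    · have hnot : x ∉ s := fun hm => h ((PySem.Set.contains_iff s x).mpr hm)
      have hadd : PySem.Set.add s x = s ++ [x] := by simp [PySem.Set.add, hnot]
      rw [if_neg h,
        show (PySem.Set.add s x, s ++ [x])
            = (PySem.Set.add s x, (PySem.Set.add s x : List String)) from by rw [hadd],
        ih, hupd]

-- filtering a value out commutes with set(·)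
theorem ofList_filter_ne (t : List String) (h : String) :
    PySem.Set.ofList (t.filter (fun x => x != h))
      = (PySem.Set.ofList t).filter (fun x => x != h) := by
  induction t with
  | nil => rfl
  | cons a t ih =>
    have hdisc : ∀ (s : List String) (y : String),
        PySem.Set.discard s y = s.filter (fun x => x != y) := fun _ _ => rfl
    by_cases hah : a = h
    · subst hah
      rw [List.filter_cons_of_neg (by simp), ih, PySem.Set.ofList_cons, hdisc,
        List.filter_cons_of_neg (by simp), List.filter_filter]
      simp
    · have hp : (a != h) = true := bne_iff_ne.mpr hah
      have l1 : List.filter (fun x => x != h) (a :: t)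
          = a :: t.filter (fun x => x != h) := by simp [hp]
      rw [l1, PySem.Set.ofList_cons, hdisc, ih, PySem.Set.ofList_cons, hdisc]
      have l2 : List.filter (fun x => x != h)
            (a :: List.filter (fun x => x != a) (PySem.Set.ofList t))
          = a :: List.filter (fun x => x != h)
              (List.filter (fun x => x != a) (PySem.Set.ofList t)) := by
        simp [hp]
      rw [l2, List.filter_filter, List.filter_filter]
      congr 1
      apply List.filter_congr
      intro x _
      exact Bool.and_comm _ _

-- the filter-based nub computes set(·) (first occurrences, in order)
theorem pvNubFilter_eq_ofList (xs : List String) :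
    pvNubFilter xs = PySem.Set.ofList xs := by
  induction hn : xs.length using Nat.strong_induction_on generalizing xs with
  | _ n ih =>
    cases xs with
    | nil => simp [pvNubFilter]
    | cons h t =>
      have hlt : (t.filter (fun x => x != h)).length < n := by
        subst hn
        exact Nat.lt_succ_of_le (List.length_filter_le _ _)
      rw [pvNubFilter, ih _ hlt _ rfl, ofList_filter_ne, PySem.Set.ofList_cons]
      rfl

theorem merge_skill_hints_agree (tools_used from_read_file : List String) :
    merge_skill_hints_py tools_used from_read_file
      = merge_skill_hints_py_alt tools_used from_read_file := by
  unfold merge_skill_hints_py merge_skill_hints_py_alt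
  have h0 : (PySem.Set.empty : PySem.Set String) = ([] : List String) := rfl
  rw [h0, mergeA_loop from_read_file []]
  have hofL : PySem.Set.update ([] : PySem.Set String) from_read_file
      = PySem.Set.ofList from_read_file := rfl
  have hcand : PySem.Set.ofList (from_read_file ++ ["action-finder"])
      = PySem.Set.add (PySem.Set.ofList from_read_file) "action-finder" := by
    simp [PySem.Set.ofList_eq_foldl]
  rw [hofL]
  by_cases htool : "action_finder_log" ∈ tools_used
  · by_cases hin : PySem.Set.contains (PySem.Set.ofList from_read_file) "action-finder" = true
    · have hmem : "action-finder" ∈ from_read_file :=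
        (PySem.Set.mem_ofList _ _).mp ((PySem.Set.contains_iff _ _).mp hin)
      rw [if_neg (fun hc => hc.2 hin), if_pos htool, pvNubFilter_eq_ofList, hcand]
      simp [PySem.Set.add, hmem]
    · have hmem : "action-finder" ∉ from_read_file := fun hm =>
        hin ((PySem.Set.contains_iff _ _).mpr ((PySem.Set.mem_ofList _ _).mpr hm))
      rw [if_pos ⟨htool, hin⟩, if_pos htool, pvNubFilter_eq_ofList, hcand]
      simp [PySem.Set.add, hmem]
  · rw [if_neg (fun hc => htool hc.1), if_neg htool, pvNubFilter_eq_ofList]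

-- ===== VERDICT (by name: the statement is the Claim_ definition above) =====
theorem merge_skill_hints_py_spec : Claim_equal_merge_skill_hints_py := by
  intro tu frf _
  exact merge_skill_hints_agree tu frf
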